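-- pv_equiv track=rewrite | github.com/havarpan/neoprechac | src/python/patternStrToAnimationUrl.py | build_jlab_pattern
-- ===== SOURCE A (Python) =====
-- def build_jlab_pattern(throws, pass_flags, n):
--
--     # one-person throws, 'p' (passes) included
--     throws_with_ps = []
--     for i in range(len(throws)):
--         throw_number = throws[i]
--         pass_flag = pass_flags[i]
--         if len(set(pass_flags)) <= 2 and max(pass_flags) <= 1:
--             throw_with_p = f'{throw_number}p' if pass_flag else f'{throw_number}'
--         else:
--             throw_with_p = f'{throw_number}p{int(pass_flag)+1}' if int(pass_flag)>0 else f'{throw_number}'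
--         throws_with_ps.append(throw_with_p)
--
--     # shifted one-person throws
--     pattern = throws_with_ps
--
--     shifted_patterns = [pattern]
--     for i in range(1,n):
--
--         k = i*len(pattern)//n
--
--         shifted_pattern = []
--         for j in range(len(pattern)):
--             shifted_pattern.append(
--                 pattern[(j - k) % len(pattern)]
--             )
--         if len(set(pass_flags)) >= 3 or max(pass_flags) >= 2:
--             for index, entry in enumerate(shifted_pattern):
--                 if len(entry) == 3: # we have a number
--                     entry = list(entry)
--                     mypassflag = int(entry[-1]) # between 1 and n (inclusive)
--                     mypassflag = ((mypassflag - 1 + i) % n) + 1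
--                     entry[-1] = mypassflag
--                     shifted_pattern[index] = ''.join(list(map(str,entry)))
--
--         shifted_patterns.append(shifted_pattern)
--
--     # https://stackoverflow.com/questions/6473679/transpose-list-of-lists
--     transposed_patterns = list(map(list, zip(*shifted_patterns)))
--
--     pattern = ''.join(
--         '<' + '|'.join(p) + '>' for p in transposed_patterns
--     )
--
--     return pattern
-- ===== SOURCE B (Python) =====
-- def build_jlab_pattern(throws, pass_flags, n):
--     # Build the output column by column (one '<...>' group per throw position):
--     # no intermediate matrix of n shifted rows and no transpose step.
--     m = len(throws)
--     if m == 0: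
--         return ''
--     low = len(set(pass_flags)) <= 2 and max(pass_flags) <= 1
--     base = []
--     for t, f in zip(throws, pass_flags):
--         if low:
--             base.append(f'{t}p' if f else f'{t}')
--         else:
--             base.append(f'{t}p{int(f)+1}' if int(f) > 0 else f'{t}')
--     out = []
--     for j in range(m):
--         col = [base[j]]
--         for i in range(1, n):
--             entry = base[(j - i * m // n) % m]
--             if not low and len(entry) == 3:
--                 entry = entry[:2] + str(((int(entry[-1]) - 1 + i) % n) + 1)
--             col.append(entry)
--         out.append('<' + '|'.join(col) + '>')
--     return ''.join(out)
-- ===== Notes on version B (the rewrite author's own statement) =====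
-- stated objective: simpler
-- what changed: B emits the output column by column, computing each '<...>' group directly from the base pattern (shift index and pass-flag remap applied per entry), instead of materialising the n shifted-row lists and transposing them with zip(*rows).
import Mathlib
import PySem

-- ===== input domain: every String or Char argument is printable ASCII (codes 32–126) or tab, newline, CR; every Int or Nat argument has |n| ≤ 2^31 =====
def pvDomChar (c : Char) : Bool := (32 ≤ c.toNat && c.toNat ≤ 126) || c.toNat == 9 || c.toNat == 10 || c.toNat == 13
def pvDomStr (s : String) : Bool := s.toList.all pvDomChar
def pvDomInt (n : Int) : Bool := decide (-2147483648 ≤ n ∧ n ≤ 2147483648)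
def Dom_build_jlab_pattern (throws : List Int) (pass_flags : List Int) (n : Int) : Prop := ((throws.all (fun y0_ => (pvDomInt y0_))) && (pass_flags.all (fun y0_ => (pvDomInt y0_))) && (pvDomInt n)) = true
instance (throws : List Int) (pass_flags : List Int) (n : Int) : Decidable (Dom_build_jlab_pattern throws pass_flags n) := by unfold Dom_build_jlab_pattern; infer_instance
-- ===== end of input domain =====

-- B builds the pattern column by column (one '<...>' group per throw position) instead of
-- building n shifted rows and transposing them; same return value, no side effects.


-- ===== PORT A =====
-- strings are modelled as List Char (PySem.Chars); f'{x}' for an int is PySem.Int.toChars.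

-- 'len(set(pass_flags)) <= 2 and max(pass_flags) <= 1' (max() made total via getD 0;
-- Python only evaluates it on nonempty pass_flags, which Pre_ guarantees).
def pvA_low (pass_flags : List Int) : Bool :=
  decide ((PySem.Set.ofList pass_flags).length ≤ 2) &&
    decide ((PySem.List.max? pass_flags (fun x => x)).getD 0 ≤ 1)

-- 'len(set(pass_flags)) >= 3 or max(pass_flags) >= 2'
def pvA_high (pass_flags : List Int) : Bool :=
  decide (3 ≤ (PySem.Set.ofList pass_flags).length) ||
    decide (2 ≤ (PySem.List.max? pass_flags (fun x => x)).getD 0)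

-- body of the throws_with_ps loop
def pvA_entryAt (throws : List Int) (pass_flags : List Int) (i : Int) : List Char :=
  let t := PySem.List.pyGetD throws i 0
  let f := PySem.List.pyGetD pass_flags i 0
  if pvA_low pass_flags then
    (if f ≠ 0 then PySem.Int.toChars t ++ ['p'] else PySem.Int.toChars t)
  else
    (if 0 < f then PySem.Int.toChars t ++ ['p'] ++ PySem.Int.toChars (f + 1)
     else PySem.Int.toChars t)

-- the throws_with_ps loop
def pvA_thp (throws : List Int) (pass_flags : List Int) : List (List Char) :=
  (PySem.List.pyRange 0 throws.length 1).foldl (fun acc i =>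
    acc ++ [pvA_entryAt throws pass_flags i]) []

-- the shifted_pattern inner loop
def pvA_shiftRow (pattern : List (List Char)) (k : Int) : List (List Char) :=
  (PySem.List.pyRange 0 pattern.length 1).foldl (fun acc j =>
    acc ++ [PySem.List.pyGetD pattern (PySem.Int.mod (j - k) (pattern.length : Int)) []]) []

-- one step of the enumerate/in-place-update loop (it updates each position independently, = a map);
-- ''.join(map(str, entry-with-last-replaced)) is take 2 ++ str(mypassflag) when len(entry)==3.
def pvA_remap (n i : Int) (entry : List Char) : List Char :=
  if entry.length == 3 then
    let mypassflag := (PySem.Int.ofChars? [PySem.List.pyGetD entry (-1) ' ']).getD 0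
    entry.take 2 ++ PySem.Int.toChars (PySem.Int.mod (mypassflag - 1 + i) n + 1)
  else entry

-- body of the 'for i in range(1, n)' loop
def pvA_row (pass_flags : List Int) (n : Int) (pattern : List (List Char)) (i : Int) :
    List (List Char) :=
  let k := PySem.Int.floordiv (i * (pattern.length : Int)) n
  let sp := pvA_shiftRow pattern k
  if pvA_high pass_flags then sp.map (pvA_remap n i) else sp

-- shifted_patterns (seeded with [pattern])
def pvA_rows (pass_flags : List Int) (n : Int) (pattern : List (List Char)) :
    List (List (List Char)) :=
  (PySem.List.pyRange 1 n 1).foldl (fun acc i =>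
    acc ++ [pvA_row pass_flags n pattern i]) [pattern]

-- list(map(list, zip(*rows))): zip truncates at the shortest row (here all rows have equal length)
def pvA_transpose (rows : List (List (List Char))) : List (List (List Char)) :=
  (List.range (((rows.map List.length).min?).getD 0)).map (fun j =>
    rows.map (fun r => r.getD j []))

def build_jlab_pattern (throws : List Int) (pass_flags : List Int) (n : Int) : String :=
  let pattern := pvA_thp throws pass_flags
  let rows := pvA_rows pass_flags n pattern
  let cols := pvA_transpose rows
  String.ofList (cols.foldl (fun acc p =>
    acc ++ ('<' :: PySem.Chars.join ['|'] p ++ ['>'])) [])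

-- ===== PORT B =====
-- the base (throws_with_ps) list, built by zipping throws with pass_flags
def pvB_base (low : Bool) (throws : List Int) (pass_flags : List Int) : List (List Char) :=
  (throws.zip pass_flags).map (fun tf =>
    if low then
      (if tf.2 ≠ 0 then PySem.Int.toChars tf.1 ++ ['p'] else PySem.Int.toChars tf.1)
    else
      (if 0 < tf.2 then PySem.Int.toChars tf.1 ++ ['p'] ++ PySem.Int.toChars (tf.2 + 1)
       else PySem.Int.toChars tf.1))

-- body of the 'for i in range(1, n)' loop of B: person i's entry of column j
def pvB_entry (low : Bool) (base : List (List Char)) (m : Nat) (n : Int) (j : Nat) (i : Int) :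
    List Char :=
  let entry := PySem.List.pyGetD base
    (PySem.Int.mod ((j : Int) - PySem.Int.floordiv (i * (m : Int)) n) (m : Int)) []
  if !low && entry.length == 3 then
    entry.take 2 ++ PySem.Int.toChars
      (PySem.Int.mod ((PySem.Int.ofChars? [PySem.List.pyGetD entry (-1) ' ']).getD 0 - 1 + i) n + 1)
  else entry

-- one column: person 0's entry followed by persons 1..n-1
def pvB_col (low : Bool) (base : List (List Char)) (m : Nat) (n : Int) (j : Nat) :
    List (List Char) :=
  (PySem.List.pyRange 1 n 1).foldl (fun col i =>
    col ++ [pvB_entry low base m n j i]) [base.getD j []]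

def build_jlab_pattern_alt (throws : List Int) (pass_flags : List Int) (n : Int) : String :=
  let m := throws.length
  if m = 0 then "" else
  let low := decide ((PySem.Set.ofList pass_flags).length ≤ 2) &&
    decide ((PySem.List.max? pass_flags (fun x => x)).getD 0 ≤ 1)
  let base := pvB_base low throws pass_flags
  String.ofList (((List.range m).map (fun j =>
    '<' :: PySem.Chars.join ['|'] (pvB_col low base m n j) ++ ['>'])).flatten)

-- ===== PRECONDITION & SPEC =====
-- Pre_ excludes exactly the inputs where A raises: pass_flags shorter than throws (IndexError on
-- pass_flags[i]) and empty pass_flags with n >= 2 (ValueError: max() of an empty sequence).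
def Pre_build_jlab_pattern (throws : List Int) (pass_flags : List Int) (n : Int) : Prop :=
  throws.length ≤ pass_flags.length ∧ (pass_flags = [] → n ≤ 1)
instance (throws : List Int) (pass_flags : List Int) (n : Int) : Decidable (Pre_build_jlab_pattern throws pass_flags n) := by unfold Pre_build_jlab_pattern; infer_instance
def pvWitness_build_jlab_pattern : List Int × List Int × Int := ([4, 2, 3], [1, 0, 2], 2)

def Spec_build_jlab_pattern (throws : List Int) (pass_flags : List Int) (n : Int) (out : String) : Prop := out = build_jlab_pattern_alt throws pass_flags n
instance (throws : List Int) (pass_flags : List Int) (n : Int) (out : String) : Decidable (Spec_build_jlab_pattern throws pass_flags n out) := by unfold Spec_build_jlab_pattern; infer_instance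

-- ===== CLAIM (what is proved, stated in full; the proofs are below) =====
def Claim_equal_build_jlab_pattern : Prop := ∀ (throws : List Int) (pass_flags : List Int) (n : Int), Dom_build_jlab_pattern throws pass_flags n → Pre_build_jlab_pattern throws pass_flags n → Spec_build_jlab_pattern throws pass_flags n (build_jlab_pattern throws pass_flags n)

-- ===== LEMMAS AND PROOFS =====

theorem pvFoldl_snoc1 {α β : Type} (g : α → β) (l : List α) (init : List β) :
    l.foldl (fun acc x => acc ++ [g x]) init = init ++ l.map g := by
  induction l generalizing init with
  | nil => simp
  | cons a t ih => simp [List.foldl_cons, ih]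

theorem pvFoldl_snoc {α β : Type} (g : α → List β) (l : List α) (init : List β) :
    l.foldl (fun acc x => acc ++ g x) init = init ++ (l.map g).flatten := by
  induction l generalizing init with
  | nil => simp
  | cons a t ih => simp [List.foldl_cons, ih, List.append_assoc]

-- pyRange 0 m 1 over a Nat bound is List.range with a cast
theorem pvRange0 (m : Nat) :
    PySem.List.pyRange 0 (m : Int) 1 = (List.range m).map (fun (k : Nat) => (k : Int)) := by
  rw [PySem.List.pyRange_one]
  simp

-- the two regime conditions are each other's negation
theorem pvHigh_eq_not_low (pass_flags : List Int) :
    pvA_high pass_flags = !pvA_low pass_flags := by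
  unfold pvA_high pvA_low
  by_cases h1 : 3 ≤ (PySem.Set.ofList pass_flags).length <;>
    by_cases h2 : 2 ≤ (PySem.List.max? pass_flags (fun x => x)).getD 0 <;>
      simp [h1, h2] <;> omega

-- index loop over two parallel lists = map over their zip
theorem pvZipmap (G : Int → Int → List Char) (t p : List Int) (h : t.length ≤ p.length) :
    (List.range t.length).map (fun k => G (t.getD k 0) (p.getD k 0)) =
      (t.zip p).map (fun tf => G tf.1 tf.2) := by
  induction t generalizing p with
  | nil => simp
  | cons a tl ih =>
    cases p with
    | nil => simp at h
    | cons b pl =>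
      simp only [List.length_cons, List.range_succ_eq_map, List.map_cons, List.map_map,
        List.zip_cons_cons]
      refine congrArg₂ _ (by simp) ?_
      have := ih pl (by simpa using h)
      simpa [Function.comp] using this

-- throws_with_ps equals B's base list
theorem pvThp_eq (throws pass_flags : List Int) (h : throws.length ≤ pass_flags.length) :
    pvA_thp throws pass_flags = pvB_base (pvA_low pass_flags) throws pass_flags := by
  unfold pvA_thp pvB_base
  rw [pvFoldl_snoc1 (pvA_entryAt throws pass_flags), List.nil_append, pvRange0, List.map_map]
  have hk : ∀ k : Nat, pvA_entryAt throws pass_flags (k : Int) =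
      (fun t f => if pvA_low pass_flags then
          (if f ≠ 0 then PySem.Int.toChars t ++ ['p'] else PySem.Int.toChars t)
        else
          (if 0 < f then PySem.Int.toChars t ++ ['p'] ++ PySem.Int.toChars (f + 1)
           else PySem.Int.toChars t)) (throws.getD k 0) (pass_flags.getD k 0) := by
    intro k
    simp [pvA_entryAt, PySem.List.pyGetD_natCast]
  exact (List.map_congr_left (fun k _ => hk k)).trans
    (pvZipmap (fun t f => if pvA_low pass_flags then
        (if f ≠ 0 then PySem.Int.toChars t ++ ['p'] else PySem.Int.toChars t)
      else
        (if 0 < f then PySem.Int.toChars t ++ ['p'] ++ PySem.Int.toChars (f + 1)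
         else PySem.Int.toChars t)) throws pass_flags h)

theorem pvShiftRow_eq (pattern : List (List Char)) (k : Int) :
    pvA_shiftRow pattern k = (List.range pattern.length).map (fun (j : Nat) =>
      PySem.List.pyGetD pattern (PySem.Int.mod ((j : Int) - k) (pattern.length : Int)) []) := by
  unfold pvA_shiftRow
  rw [pvFoldl_snoc1 (fun j => PySem.List.pyGetD pattern
    (PySem.Int.mod (j - k) (pattern.length : Int)) []), List.nil_append, pvRange0, List.map_map]
  rfl

theorem pvShiftRow_len (pattern : List (List Char)) (k : Int) :
    (pvA_shiftRow pattern k).length = pattern.length := by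
  rw [pvShiftRow_eq]; simp

theorem pvRow_len (pass_flags : List Int) (n : Int) (pattern : List (List Char)) (i : Int) :
    (pvA_row pass_flags n pattern i).length = pattern.length := by
  unfold pvA_row
  split <;> simp [pvShiftRow_len]

theorem pvRows_eq (pass_flags : List Int) (n : Int) (pattern : List (List Char)) :
    pvA_rows pass_flags n pattern =
      pattern :: (PySem.List.pyRange 1 n 1).map (pvA_row pass_flags n pattern) := by
  unfold pvA_rows
  rw [pvFoldl_snoc1 (pvA_row pass_flags n pattern)]
  rfl

-- min of a nonempty list of equal naturals
theorem pvMin_const (m : Nat) (l : List Nat) (h : ∀ x ∈ l, x = m) :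
    ((m :: l).min?).getD 0 = m := by
  rw [List.min?_cons]
  cases hm : l.min? with
  | none => simp
  | some v =>
    have : v = m := h v (List.min?_mem hm)
    simp [this]

-- getD through a map, in range
theorem pvGetD_map {α β : Type} (f : α → β) (l : List α) (j : Nat) (d : α) (d' : β)
    (h : j < l.length) : (l.map f).getD j d' = f (l.getD j d) := by
  rw [List.getD_eq_getElem _ _ (by simpa using h), List.getD_eq_getElem _ _ h]
  simp

-- column j of A's transposed rows = B's column j
theorem pvCol_eq (pass_flags : List Int) (n : Int) (pattern : List (List Char)) (j : Nat)
    (hj : j < pattern.length) :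
    (pvA_rows pass_flags n pattern).map (fun r => r.getD j []) =
      pvB_col (pvA_low pass_flags) pattern pattern.length n j := by
  rw [pvRows_eq]
  unfold pvB_col
  rw [pvFoldl_snoc1 (pvB_entry (pvA_low pass_flags) pattern pattern.length n j)]
  simp only [List.map_cons, List.map_map, List.singleton_append]
  refine congrArg₂ _ rfl (List.map_congr_left ?_)
  intro i hi
  have hent : (pvA_shiftRow pattern (PySem.Int.floordiv (i * (pattern.length : Int)) n)).getD j []
      = PySem.List.pyGetD pattern
          (PySem.Int.mod ((j : Int) - PySem.Int.floordiv (i * (pattern.length : Int)) n)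
            (pattern.length : Int)) [] := by
    rw [pvShiftRow_eq]
    exact PySem.List.getD_map_range _ _ _ _ hj
  simp only [Function.comp_apply]
  unfold pvA_row pvB_entry
  rw [pvHigh_eq_not_low]
  cases hlow : pvA_low pass_flags with
  | true =>
    simp only [Bool.not_true, Bool.false_eq_true, if_false, Bool.false_and]
    exact hent
  | false =>
    simp only [Bool.not_false, Bool.true_and, if_true]
    rw [pvGetD_map (pvA_remap n i) _ j [] [] (by rwa [pvShiftRow_len]), hent]
    unfold pvA_remap
    rfl

-- the empty-throws case: both sides are the empty string
theorem pvEmpty (pass_flags : List Int) (n : Int) :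
    build_jlab_pattern [] pass_flags n = "" := by
  have hpat : pvA_thp [] pass_flags = [] := by
    unfold pvA_thp
    rw [PySem.List.pyRange_one_eq_nil (by simp)]
    rfl
  have hrow : ∀ i : Int, pvA_row pass_flags n [] i = [] := by
    intro i
    unfold pvA_row
    have hsp : pvA_shiftRow ([] : List (List Char))
        (PySem.Int.floordiv (i * ((List.length ([] : List (List Char))) : Int)) n) = [] := by
      unfold pvA_shiftRow
      rw [PySem.List.pyRange_one_eq_nil (by simp)]
      rfl
    simp only [hsp]
    split <;> simp
  simp only [build_jlab_pattern, hpat, pvRows_eq, pvA_transpose]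
  have hmin : (((([] : List (List Char)) ::
      (PySem.List.pyRange 1 n 1).map (pvA_row pass_flags n [])).map List.length).min?).getD 0
        = 0 := by
    simp only [List.map_cons, List.length_nil, List.map_map]
    apply pvMin_const
    intro x hx
    simp only [List.mem_map, Function.comp_apply] at hx
    obtain ⟨i, _, hix⟩ := hx
    rw [← hix, hrow i]
    rfl
  rw [hmin]
  simp

-- ===== VERDICT (by name: the statement is the Claim_ definition above) =====
theorem build_jlab_pattern_spec : Claim_equal_build_jlab_pattern := by
  intro throws pass_flags n _ hpre
  unfold Spec_build_jlab_pattern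
  rcases hpre with ⟨hlen, _⟩
  rcases hthrows : throws with _ | ⟨t, ts⟩
  · rw [pvEmpty]
    rfl
  · rw [← hthrows]
    have hm : ¬ throws.length = 0 := by rw [hthrows]; simp
    have hbase := pvThp_eq throws pass_flags hlen
    have hpatlen : (pvA_thp throws pass_flags).length = throws.length := by
      rw [hbase]
      unfold pvB_base
      simp [Nat.min_eq_left hlen]
    have hminlen : (((pvA_rows pass_flags n (pvA_thp throws pass_flags)).map List.length).min?).getD 0
        = throws.length := by
      rw [pvRows_eq]
      simp only [List.map_cons, List.map_map, hpatlen]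
      apply pvMin_const
      intro x hx
      simp only [List.mem_map, Function.comp_apply] at hx
      obtain ⟨i, _, hix⟩ := hx
      rw [← hix, pvRow_len, hpatlen]
    simp only [build_jlab_pattern, build_jlab_pattern_alt, pvA_transpose, if_neg hm]
    rw [hminlen, List.foldl_map]
    rw [pvFoldl_snoc (fun j => ('<' :: PySem.Chars.join ['|']
      ((pvA_rows pass_flags n (pvA_thp throws pass_flags)).map (fun r => r.getD j [])) ++ ['>'])),
      List.nil_append]
    refine congrArg _ (congrArg _ (List.map_congr_left ?_))
    intro j hj
    have hj' : j < (pvA_thp throws pass_flags).length := by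
      rw [hpatlen]; exact List.mem_range.mp hj
    rw [pvCol_eq pass_flags n _ j hj', hpatlen, hbase]
    rfl
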